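-- pv_equiv track=rewrite | github.com/ablayed/islamic-ner | scripts/boost_silver_data.py | merge_allowed_entities
-- ===== SOURCE A (Python) =====
-- from collections import Counter
-- from typing import Dict, Iterable, List, Sequence, Tuple
--
-- def extract_entity_spans(
--     labels: Sequence[str], allowed_types: Iterable[str] | None = None
-- ) -> List[Tuple[int, int, str]]:
--     allowed = set(allowed_types) if allowed_types is not None else None
--     spans: List[Tuple[int, int, str]] = []
--     idx = 0
--
--     while idx < len(labels):
--         label = labels[idx]
--         if label == "O" or "-" not in label:
--             idx += 1
--             continue
--
--         prefix, entity_type = label.split("-", 1)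
--         if prefix not in {"B", "I"}:
--             idx += 1
--             continue
--
--         start = idx
--         idx += 1
--         while idx < len(labels) and labels[idx] == f"I-{entity_type}":
--             idx += 1
--         end = idx
--
--         if allowed is not None and entity_type not in allowed:
--             continue
--         spans.append((start, end, entity_type))
--
--     return spans
--
-- def merge_allowed_entities(
--     base_labels: Sequence[str],
--     candidate_labels: Sequence[str],
--     allowed_types: Iterable[str],
-- ) -> Tuple[List[str], Dict[str, int]]:
--     if len(base_labels) != len(candidate_labels):
--         raise ValueError("Label length mismatch while merging selected entities.")
--
--     merged = list(base_labels)
--     added_counter: Counter = Counter()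
--     spans = extract_entity_spans(candidate_labels, allowed_types=allowed_types)
--     spans.sort(key=lambda span: (span[0], -(span[1] - span[0])))
--
--     for start, end, entity_type in spans:
--         if start < 0 or end <= start or end > len(merged):
--             continue
--         if any(label != "O" for label in merged[start:end]):
--             continue
--         merged[start] = f"B-{entity_type}"
--         for idx in range(start + 1, end):
--             merged[idx] = f"I-{entity_type}"
--         added_counter[entity_type] += 1
--
--     return merged, dict(added_counter)
-- ===== SOURCE B (Python) =====
-- def merge_allowed_entities(base_labels, candidate_labels, allowed_types):
--     if len(base_labels) != len(candidate_labels):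
--         raise ValueError("Label length mismatch while merging selected entities.")
--     merged = list(base_labels)
--     counts = {}
--     allowed = set(allowed_types)
--     n = len(candidate_labels)
--     i = 0
--     while i < n:
--         label = candidate_labels[i]
--         if label == "O" or "-" not in label:
--             i += 1
--             continue
--         prefix, etype = label.split("-", 1)
--         if prefix not in ("B", "I"):
--             i += 1
--             continue
--         start = i
--         i += 1
--         while i < n and candidate_labels[i] == "I-" + etype:
--             i += 1
--         if etype in allowed and all(l == "O" for l in merged[start:i]):
--             merged[start] = "B-" + etype
--             for j in range(start + 1, i):
--                 merged[j] = "I-" + etype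
--             counts[etype] = counts.get(etype, 0) + 1
--     return merged, counts
-- ===== Notes on version B (the rewrite author's own statement) =====
-- stated objective: simpler
-- what changed: B merges in a single fused index scan over candidate_labels (detect a span, advance past its I-run, filter and write it into merged immediately), eliminating A's intermediate span list, its separate extract helper and its sort.
import Mathlib
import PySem

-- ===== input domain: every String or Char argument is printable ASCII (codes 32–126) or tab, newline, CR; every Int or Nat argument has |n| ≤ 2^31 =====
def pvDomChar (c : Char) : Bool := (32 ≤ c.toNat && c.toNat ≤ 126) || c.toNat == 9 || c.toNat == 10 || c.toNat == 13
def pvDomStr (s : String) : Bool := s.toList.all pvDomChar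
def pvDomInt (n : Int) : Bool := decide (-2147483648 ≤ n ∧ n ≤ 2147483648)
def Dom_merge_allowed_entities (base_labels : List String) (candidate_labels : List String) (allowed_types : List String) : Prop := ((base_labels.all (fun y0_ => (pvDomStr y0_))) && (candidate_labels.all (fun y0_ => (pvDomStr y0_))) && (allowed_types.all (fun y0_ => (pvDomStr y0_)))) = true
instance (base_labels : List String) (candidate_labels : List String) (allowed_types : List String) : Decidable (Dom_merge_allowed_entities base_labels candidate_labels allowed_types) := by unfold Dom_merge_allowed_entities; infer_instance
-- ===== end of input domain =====

-- B replaces A's extract-spans / sort / apply pipeline by one fused index scan; equivalence is about the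
-- RETURN value only (neither program mutates its arguments observably for the caller).

-- ===== PORT A =====
-- the inner 'while idx < len(labels) and labels[idx] == f"I-{entity_type}"' of extract_entity_spans
def pvScanA (labels : List String) (ty : String) (j : Nat) : Nat :=
  if h : j < labels.length then
    if labels[j] == "I-" ++ ty then pvScanA labels ty (j + 1) else j
  else j
termination_by labels.length - j

theorem pvScanA_ge (labels : List String) (ty : String) (j : Nat) : j ≤ pvScanA labels ty j := by
  unfold pvScanA
  split
  · split
    · exact Nat.le_trans (Nat.le_succ j) (pvScanA_ge labels ty (j + 1))
    · exact Nat.le_refl j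
  · exact Nat.le_refl j
termination_by labels.length - j

-- extract_entity_spans(labels, allowed): the outer while-loop as recursion on the index
def pvExtractA (labels : List String) (allowed : List String) (idx : Nat) : List (Nat × Nat × String) :=
  if h : idx < labels.length then
    if labels[idx] == "O" || !(PySem.Str.isIn "-" labels[idx]) then pvExtractA labels allowed (idx + 1)
    else
      match PySem.Str.splitMax? labels[idx] "-" 1 with
      | some (pre :: ty :: _) =>
        if !(pre == "B" || pre == "I") then pvExtractA labels allowed (idx + 1)
        else
          let e := pvScanA labels ty (idx + 1)
          if allowed.contains ty then (idx, e, ty) :: pvExtractA labels allowed e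
          else pvExtractA labels allowed e
      | _ => pvExtractA labels allowed (idx + 1)   -- unreachable: '-' ∈ label ⇒ two parts
  else []
termination_by labels.length - idx
decreasing_by all_goals first
  | omega
  | (have := pvScanA_ge labels ty (idx + 1); omega)

-- the body of A's 'for start, end, entity_type in spans' loop
def pvApplyA (st : List String × PySem.Dict String Int) (sp : Nat × Nat × String) :
    List String × PySem.Dict String Int :=
  if ((sp.1 : Int) < 0) || ((sp.2.1 : Int) ≤ (sp.1 : Int)) || ((sp.2.1 : Int) > (st.1.length : Int)) then st
  else if (PySem.List.slice st.1 (some (sp.1 : Int)) (some (sp.2.1 : Int))).any (fun l => l != "O") then st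
  else
    ((PySem.List.pyRange ((sp.1 : Int) + 1) (sp.2.1 : Int) 1).foldl
      (fun m j => m.set j.toNat ("I-" ++ sp.2.2)) (st.1.set sp.1 ("B-" ++ sp.2.2)),
     st.2.modify sp.2.2 0 (· + 1))

def merge_allowed_entities (base_labels : List String) (candidate_labels : List String) (allowed_types : List String) : List String × (List (String × Int)) :=
  if base_labels.length ≠ candidate_labels.length then ([], [])  -- Python raises ValueError here; excluded by Pre_
  else
    match (PySem.List.sorted2 (pvExtractA candidate_labels allowed_types 0)
        (fun s => s.1) (fun s => -(((s.2.1 : Int)) - (s.1 : Int)))).foldl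
        pvApplyA (base_labels, PySem.Dict.empty) with
    | (m, c) => (m, c.items)

-- ===== PORT B =====
-- the inner 'while i < n and candidate_labels[i] == "I-" + etype'
def pvScanB (labels : List String) (ty : String) (j : Nat) : Nat :=
  if h : j < labels.length then
    if labels[j] == "I-" ++ ty then pvScanB labels ty (j + 1) else j
  else j
termination_by labels.length - j

theorem pvScanB_ge (labels : List String) (ty : String) (j : Nat) : j ≤ pvScanB labels ty j := by
  unfold pvScanB
  split
  · split
    · exact Nat.le_trans (Nat.le_succ j) (pvScanB_ge labels ty (j + 1))
    · exact Nat.le_refl j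
  · exact Nat.le_refl j
termination_by labels.length - j

-- B's single fused scan: detect a span at i, advance past its I-run, filter and write it immediately
def pvMergeB (cand : List String) (allowed : List String) (i : Nat)
    (merged : List String) (counts : PySem.Dict String Int) : List String × PySem.Dict String Int :=
  if h : i < cand.length then
    if cand[i] == "O" || !(PySem.Str.isIn "-" cand[i]) then pvMergeB cand allowed (i + 1) merged counts
    else
      match PySem.Str.splitMax? cand[i] "-" 1 with
      | some (pre :: ty :: _) =>
        if !(pre == "B" || pre == "I") then pvMergeB cand allowed (i + 1) merged counts
        else
          let e := pvScanB cand ty (i + 1)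
          if allowed.contains ty
              && (PySem.List.slice merged (some (i : Int)) (some (e : Int))).all (fun l => l == "O") then
            pvMergeB cand allowed e
              ((PySem.List.pyRange ((i : Int) + 1) (e : Int) 1).foldl
                (fun m j => m.set j.toNat ("I-" ++ ty)) (merged.set i ("B-" ++ ty)))
              (counts.modify ty 0 (· + 1))
          else pvMergeB cand allowed e merged counts
      | _ => pvMergeB cand allowed (i + 1) merged counts
  else (merged, counts)
termination_by cand.length - i
decreasing_by all_goals first
  | omega
  | (have := pvScanB_ge cand ty (i + 1); omega)

def merge_allowed_entities_alt (base_labels : List String) (candidate_labels : List String) (allowed_types : List String) : List String × (List (String × Int)) :=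
  if base_labels.length ≠ candidate_labels.length then ([], [])  -- Python raises ValueError here; excluded by Pre_
  else
    match pvMergeB candidate_labels allowed_types 0 base_labels PySem.Dict.empty with
    | (m, c) => (m, c.items)

-- ===== PRECONDITION & SPEC =====
-- Pre_ excludes exactly the inputs where Python A raises ValueError: a length mismatch between the two label lists.
def Pre_merge_allowed_entities (base_labels : List String) (candidate_labels : List String) (allowed_types : List String) : Prop :=
  base_labels.length = candidate_labels.length
instance (base_labels : List String) (candidate_labels : List String) (allowed_types : List String) : Decidable (Pre_merge_allowed_entities base_labels candidate_labels allowed_types) := by unfold Pre_merge_allowed_entities; infer_instance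

def pvWitness_merge_allowed_entities : List String × List String × List String :=
  (["O", "O", "O"], ["B-PER", "I-PER", "O"], ["PER"])

def Spec_merge_allowed_entities (base_labels : List String) (candidate_labels : List String) (allowed_types : List String) (out : List String × (List (String × Int))) : Prop := out = merge_allowed_entities_alt base_labels candidate_labels allowed_types
instance (base_labels : List String) (candidate_labels : List String) (allowed_types : List String) (out : List String × (List (String × Int))) : Decidable (Spec_merge_allowed_entities base_labels candidate_labels allowed_types out) := by unfold Spec_merge_allowed_entities; infer_instance

-- ===== CLAIM (what is proved, stated in full; the proofs are below) =====
def Claim_equal_merge_allowed_entities : Prop := ∀ (base_labels : List String) (candidate_labels : List String) (allowed_types : List String), Dom_merge_allowed_entities base_labels candidate_labels allowed_types → Pre_merge_allowed_entities base_labels candidate_labels allowed_types → Spec_merge_allowed_entities base_labels candidate_labels allowed_types (merge_allowed_entities base_labels candidate_labels allowed_types)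

-- ===== LEMMAS AND PROOFS =====

theorem scanB_eq_scanA (labels : List String) (ty : String) (j : Nat) :
    pvScanB labels ty j = pvScanA labels ty j := by
  unfold pvScanA pvScanB
  split
  · split
    · exact scanB_eq_scanA labels ty (j + 1)
    · rfl
  · rfl
termination_by labels.length - j

theorem pvScanA_le (labels : List String) (ty : String) (j : Nat) (hj : j ≤ labels.length) :
    pvScanA labels ty j ≤ labels.length := by
  unfold pvScanA
  split
  · split
    · exact pvScanA_le labels ty (j + 1) (by omega)
    · exact hj
  · exact hj
termination_by labels.length - j

-- every span extracted from index idx starts at ≥ idx, is nonempty and ends within the list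
theorem extract_bounds (labels : List String) (allowed : List String) (idx : Nat)
    (sp : Nat × Nat × String) (hsp : sp ∈ pvExtractA labels allowed idx) :
    idx ≤ sp.1 ∧ sp.1 < sp.2.1 ∧ sp.2.1 ≤ labels.length := by
  rw [pvExtractA.eq_def] at hsp
  split at hsp
  · rename_i h
    dsimp only at hsp
    split at hsp
    · have := extract_bounds labels allowed (idx + 1) sp hsp; omega
    · split at hsp
      · split at hsp
        · have := extract_bounds labels allowed (idx + 1) sp hsp; omega
        · rename_i pre ty rest _ _
          split at hsp
          · rcases List.mem_cons.mp hsp with hEq | hMem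
            · subst hEq
              refine ⟨Nat.le_refl _, ?_, pvScanA_le labels ty (idx + 1) (by omega)⟩
              have := pvScanA_ge labels ty (idx + 1)
              simpa using by omega
            · have hscan := pvScanA_ge labels ty (idx + 1)
              have := extract_bounds labels allowed (pvScanA labels ty (idx + 1)) sp hMem
              omega
          · have hscan := pvScanA_ge labels ty (idx + 1)
            have := extract_bounds labels allowed (pvScanA labels ty (idx + 1)) sp hsp
            omega
      · have := extract_bounds labels allowed (idx + 1) sp hsp; omega
  · simp at hsp
termination_by labels.length - idx
decreasing_by all_goals omega

theorem extract_pairwise (labels : List String) (allowed : List String) (idx : Nat) :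
    (pvExtractA labels allowed idx).Pairwise (fun a b => a.1 < b.1) := by
  rw [pvExtractA.eq_def]
  split
  · dsimp only
    split
    · exact extract_pairwise labels allowed (idx + 1)
    · split
      · split
        · exact extract_pairwise labels allowed (idx + 1)
        · rename_i pre ty rest _ _
          have hscan := pvScanA_ge labels ty (idx + 1)
          split
          · refine List.pairwise_cons.mpr ⟨?_, extract_pairwise labels allowed (pvScanA labels ty (idx + 1))⟩
            intro sp hsp
            have h1 := extract_bounds labels allowed (pvScanA labels ty (idx + 1)) sp hsp
            simp only
            omega
          · exact extract_pairwise labels allowed (pvScanA labels ty (idx + 1))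
      · exact extract_pairwise labels allowed (idx + 1)
  · exact List.Pairwise.nil
termination_by labels.length - idx
decreasing_by all_goals omega

-- a fold of insertBy over a list whose later elements are never 'before' earlier ones is the identity
theorem foldl_insertBy_of_pairwise {α : Type} (before : α → α → Bool) (xs : List α)
    (h : xs.Pairwise (fun a b => before b a = false)) :
    xs.foldl (fun acc x => PySem.List.insertBy before x acc) [] = xs := by
  induction xs using List.reverseRecOn with
  | nil => rfl
  | append_singleton ys x ih =>
    rw [List.foldl_append, List.foldl_cons, List.foldl_nil]
    have hp := (List.pairwise_append.mp h)
    rw [ih hp.1]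
    exact PySem.List.insertBy_of_forall_not_before before x ys
      (fun y hy => hp.2.2 y hy x (List.mem_singleton.mpr rfl))

theorem sorted2_extract_eq (labels : List String) (allowed : List String) :
    PySem.List.sorted2 (pvExtractA labels allowed 0) (fun s => s.1)
      (fun s => -(((s.2.1 : Int)) - (s.1 : Int))) = pvExtractA labels allowed 0 := by
  simp only [PySem.List.sorted2]
  apply foldl_insertBy_of_pairwise
  have hp := extract_pairwise labels allowed 0
  exact hp.imp (fun {a b} hab => by simp; omega)

-- writing a span into merged preserves the length
theorem length_writes (js : List Int) (v : String) (m : List String) :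
    (js.foldl (fun m j => m.set j.toNat v) m).length = m.length := by
  induction js generalizing m with
  | nil => rfl
  | cons j js ih => simp [List.foldl_cons, ih]

-- fusion: applying A's span list from index idx equals B's fused scan from idx
theorem fusion (cand : List String) (allowed : List String) (idx : Nat)
    (merged : List String) (counts : PySem.Dict String Int)
    (hlen : merged.length = cand.length) :
    (pvExtractA cand allowed idx).foldl pvApplyA (merged, counts) =
      pvMergeB cand allowed idx merged counts := by
  rw [pvExtractA.eq_def, pvMergeB.eq_def]
  split
  · rename_i h
    dsimp only
    split
    · exact fusion cand allowed (idx + 1) merged counts hlen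
    · split
      · split
        · exact fusion cand allowed (idx + 1) merged counts hlen
        · rename_i pre ty rest _ _
          rw [scanB_eq_scanA]
          have hge := pvScanA_ge cand ty (idx + 1)
          have hle := pvScanA_le cand ty (idx + 1) (by omega)
          set e := pvScanA cand ty (idx + 1) with he
          by_cases hal : allowed.contains ty
          · simp only [hal, if_true, Bool.true_and]
            by_cases hO : (PySem.List.slice merged (some (idx : Int)) (some (e : Int))).all
                (fun l => l == "O")
            · rw [hO, if_pos rfl, List.foldl_cons]
              have hstep : pvApplyA (merged, counts) (idx, e, ty) =
                  ((PySem.List.pyRange ((idx : Int) + 1) (e : Int) 1).foldl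
                      (fun m j => m.set j.toNat ("I-" ++ ty)) (merged.set idx ("B-" ++ ty)),
                    counts.modify ty 0 (· + 1)) := by
                unfold pvApplyA
                have hg1 : ¬ (((idx : Int) < 0) || ((e : Int) ≤ (idx : Int)) ||
                    ((e : Int) > ((merged.length : Nat) : Int))) = true := by
                  simp only [Bool.or_eq_true, decide_eq_true_eq]
                  omega
                rw [if_neg hg1]
                have hg2 : (PySem.List.slice merged (some (idx : Int)) (some (e : Int))).any
                    (fun l => l != "O") = false := by
                  rw [List.any_eq_false]
                  intro l hl
                  have := (List.all_eq_true.mp hO) l hl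
                  simpa using this
                rw [hg2, if_neg (by simp)]
              rw [hstep]
              exact fusion cand allowed e _ _ (by
                rw [length_writes, List.length_set, hlen])
            · rw [eq_false_of_ne_true hO, if_neg (by simp), List.foldl_cons]
              have hstep : pvApplyA (merged, counts) (idx, e, ty) = (merged, counts) := by
                unfold pvApplyA
                have hg1 : ¬ (((idx : Int) < 0) || ((e : Int) ≤ (idx : Int)) ||
                    ((e : Int) > ((merged.length : Nat) : Int))) = true := by
                  simp only [Bool.or_eq_true, decide_eq_true_eq]
                  omega
                rw [if_neg hg1]
                have hg2 : (PySem.List.slice merged (some (idx : Int)) (some (e : Int))).any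
                    (fun l => l != "O") = true := by
                  rcases List.all_eq_false.mp (eq_false_of_ne_true hO) with ⟨l, hl, hlo⟩
                  exact List.any_eq_true.mpr ⟨l, hl, by simpa using hlo⟩
                rw [hg2, if_pos rfl]
              rw [hstep]
              exact fusion cand allowed e merged counts hlen
          · simp only [hal, if_false, Bool.false_and, Bool.false_eq_true]
            exact fusion cand allowed e merged counts hlen
      · exact fusion cand allowed (idx + 1) merged counts hlen
  · rfl
termination_by cand.length - idx
decreasing_by all_goals omega

-- ===== VERDICT (by name: the statement is the Claim_ definition above) =====
theorem merge_allowed_entities_spec : Claim_equal_merge_allowed_entities := by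
  intro base cand allowed _ hpre
  unfold Spec_merge_allowed_entities merge_allowed_entities merge_allowed_entities_alt
  rw [if_neg (by exact fun hc => hc hpre), if_neg (by exact fun hc => hc hpre)]
  rw [sorted2_extract_eq, fusion cand allowed 0 base PySem.Dict.empty hpre]
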